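-- pv_equiv track=rewrite | github.com/MrBrantCode/unitest_baseline | mut_generate/mist_train_taco/taco_9654/solution.py | maximum_people_sunny_after_cloud_removal
-- ===== SOURCE A (Python) =====
-- from collections import defaultdict
--
-- def maximum_people_sunny_after_cloud_removal(town_populations, town_locations, cloud_locations, cloud_ranges):
--     # Prepare the towns list with their locations and populations
--     towns = [[town_locations[i], town_populations[i], -1] for i in range(len(town_locations))]
--
--     # Prepare the cloud start and end points
--     cloud_start = [[cloud_locations[i] - cloud_ranges[i], i] for i in range(len(cloud_locations))]
--     cloud_end = [[cloud_locations[i] + cloud_ranges[i], i] for i in range(len(cloud_locations))]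
--
--     # Sort the towns, cloud start, and cloud end points
--     towns = sorted(towns)
--     cloud_start = sorted(cloud_start)
--     cloud_end = sorted(cloud_end)
--
--     cloud_start_i = 0
--     cloud_end_i = 0
--     clouds = set()
--     d = defaultdict(int)
--     free = 0
--
--     # Iterate over each town to determine its cloud coverage
--     for town_i in range(len(towns)):
--         town_x = towns[town_i][0]
--         while cloud_start_i < len(cloud_start) and cloud_start[cloud_start_i][0] <= town_x:
--             clouds.add(cloud_start[cloud_start_i][1])
--             cloud_start_i += 1
--         while cloud_end_i < len(cloud_end) and cloud_end[cloud_end_i][0] < town_x: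
--             clouds.remove(cloud_end[cloud_end_i][1])
--             cloud_end_i += 1
--         if len(clouds) == 1:
--             towns[town_i][2] = list(clouds)[0]
--             d[list(clouds)[0]] += towns[town_i][1]
--         elif len(clouds) == 0:
--             free += towns[town_i][1]
--
--     # Return the maximum number of people that will be in a sunny town after removing one cloud
--     return max(d.values(), default=0) + free
-- ===== SOURCE B (Python) =====
-- def maximum_people_sunny_after_cloud_removal(town_populations, town_locations, cloud_locations, cloud_ranges):
--     clouds = list(zip(cloud_locations, cloud_ranges))
--     free = 0
--     best = {}
--     for x, pop in zip(town_locations, town_populations):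
--         cover = [j for j, (c, r) in enumerate(clouds) if c - r <= x <= c + r]
--         if not cover:
--             free += pop
--         elif len(cover) == 1:
--             best[cover[0]] = best.get(cover[0], 0) + pop
--     return free + max(best.values(), default=0)
-- ===== Notes on version B (the rewrite author's own statement) =====
-- stated objective: simpler
-- what changed: Replaced the three sorts and the two-pointer sweep-line with set bookkeeping by a direct per-town scan that lists the clouds covering each town and tallies free towns and single-cloud totals in one dict.
import Mathlib
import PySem

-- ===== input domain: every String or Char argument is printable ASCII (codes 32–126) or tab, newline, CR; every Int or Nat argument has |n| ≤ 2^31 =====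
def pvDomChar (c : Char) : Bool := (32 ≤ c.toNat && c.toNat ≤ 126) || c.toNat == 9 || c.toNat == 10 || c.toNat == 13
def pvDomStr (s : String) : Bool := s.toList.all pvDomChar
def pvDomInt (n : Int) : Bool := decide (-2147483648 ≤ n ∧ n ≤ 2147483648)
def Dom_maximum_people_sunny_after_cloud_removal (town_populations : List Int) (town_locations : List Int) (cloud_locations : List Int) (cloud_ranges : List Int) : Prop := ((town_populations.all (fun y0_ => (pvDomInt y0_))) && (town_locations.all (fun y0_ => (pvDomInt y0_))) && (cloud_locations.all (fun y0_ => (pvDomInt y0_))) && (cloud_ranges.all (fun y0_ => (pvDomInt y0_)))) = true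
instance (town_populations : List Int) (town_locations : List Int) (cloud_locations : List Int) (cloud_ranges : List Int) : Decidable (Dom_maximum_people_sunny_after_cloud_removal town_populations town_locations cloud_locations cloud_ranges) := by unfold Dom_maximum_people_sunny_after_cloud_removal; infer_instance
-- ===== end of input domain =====

-- B replaces A's three sorts and two-pointer sweep-line with a direct per-town covering-cloud scan (objective: simpler).

-- ===== PORT A =====
-- 'while cloud_start_i < len(cloud_start) and cloud_start[...] <= town_x': the index pointer into the
-- sorted list is rendered as consuming the list's suffix; 'clouds.add' is PySem.Set.add.
def pvAdvStart (x : Int) : List (Int × Int) → PySem.Set Int → List (Int × Int) × PySem.Set Int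
  | [], cl => ([], cl)
  | p :: rest, cl => if p.1 ≤ x then pvAdvStart x rest (PySem.Set.add cl p.2) else (p :: rest, cl)

-- 'while cloud_end_i < ... and cloud_end[...] < town_x': 'clouds.remove(j)' raises KeyError when j is
-- absent; Pre_ excludes exactly those inputs, so the total PySem.Set.discard is exact on Pre_.
def pvAdvEnd (x : Int) : List (Int × Int) → PySem.Set Int → List (Int × Int) × PySem.Set Int
  | [], cl => ([], cl)
  | p :: rest, cl => if p.1 < x then pvAdvEnd x rest (PySem.Set.discard cl p.2) else (p :: rest, cl)

-- the 'for town_i in range(len(towns))' loop; the write 'towns[town_i][2] = list(clouds)[0]' stores into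
-- a list slot that is never read again (towns is dead after the loop), so it is not carried as state;
-- 'list(clouds)[0]' under 'len(clouds) == 1' is the set's single element (headD of the singleton).
def pvALoop : List (Int × Int × Int) → List (Int × Int) → List (Int × Int) → PySem.Set Int →
    PySem.Dict Int Int → Int → PySem.Dict Int Int × Int
  | [], _, _, _, d, free => (d, free)
  | t :: ts, S, E, cl, d, free =>
    let x := t.1
    let p1 := pvAdvStart x S cl
    let p2 := pvAdvEnd x E p1.2
    if PySem.Set.len p2.2 == 1 then
      pvALoop ts p1.1 p2.1 p2.2 (PySem.Dict.modify d (p2.2.headD 0) 0 (· + t.2.1)) free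
    else if PySem.Set.len p2.2 == 0 then
      pvALoop ts p1.1 p2.1 p2.2 d (free + t.2.1)
    else
      pvALoop ts p1.1 p2.1 p2.2 d free

-- Python sorts the 3-element lists [loc, pop, -1] and the 2-element lists [s, i] lexicographically:
-- the third town component is the constant -1, so the sort is sorted2 on the first two components.
def maximum_people_sunny_after_cloud_removal (town_populations : List Int) (town_locations : List Int) (cloud_locations : List Int) (cloud_ranges : List Int) : Int :=
  let towns := (PySem.List.pyRange 0 (town_locations.length : Int) 1).map
    (fun i => (PySem.List.pyGetD town_locations i 0, PySem.List.pyGetD town_populations i 0, (-1 : Int)))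
  let cloud_start := (PySem.List.pyRange 0 (cloud_locations.length : Int) 1).map
    (fun i => (PySem.List.pyGetD cloud_locations i 0 - PySem.List.pyGetD cloud_ranges i 0, i))
  let cloud_end := (PySem.List.pyRange 0 (cloud_locations.length : Int) 1).map
    (fun i => (PySem.List.pyGetD cloud_locations i 0 + PySem.List.pyGetD cloud_ranges i 0, i))
  let towns' := PySem.List.sorted2 towns (fun t => t.1) (fun t => t.2.1)
  let S := PySem.List.sorted2 cloud_start (fun p => p.1) (fun p => p.2)
  let E := PySem.List.sorted2 cloud_end (fun p => p.1) (fun p => p.2)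
  let r := pvALoop towns' S E PySem.Set.empty PySem.Dict.empty 0
  PySem.List.maxD (PySem.Dict.values r.1) (fun v => v) 0 + r.2

-- ===== PORT B =====
-- '[j for j, (c, r) in enumerate(clouds) if c - r <= x <= c + r]'
def pvCover (C : List (Int × Int)) (x : Int) : List Int :=
  ((PySem.List.enumerate C 0).filter
    (fun p => decide (p.2.1 - p.2.2 ≤ x) && decide (x ≤ p.2.1 + p.2.2))).map (·.1)

-- loop body: 'if not cover: free += pop; elif len(cover) == 1: best[cover[0]] = best.get(cover[0], 0) + pop'
def pvBStep (C : List (Int × Int)) (st : Int × PySem.Dict Int Int) (t : Int × Int) : Int × PySem.Dict Int Int :=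
  let cover := pvCover C t.1
  if cover.isEmpty then (st.1 + t.2, st.2)
  else if (cover.length : Int) == 1 then (st.1, PySem.Dict.modify st.2 (cover.headD 0) 0 (· + t.2))
  else st

def maximum_people_sunny_after_cloud_removal_alt (town_populations : List Int) (town_locations : List Int) (cloud_locations : List Int) (cloud_ranges : List Int) : Int :=
  let clouds := cloud_locations.zip cloud_ranges
  let r := (town_locations.zip town_populations).foldl (pvBStep clouds) (0, PySem.Dict.empty)
  r.1 + PySem.List.maxD (PySem.Dict.values r.2) (fun v => v) 0

-- ===== PRECONDITION & SPEC =====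
-- Pre_ excludes exactly the inputs on which A raises: list-length mismatches (IndexError while building
-- the towns / cloud lists), and any town location lying strictly inside an inverted cloud interval
-- (possible only for a negative range), where A's 'clouds.remove' raises KeyError.
def Pre_maximum_people_sunny_after_cloud_removal (town_populations : List Int) (town_locations : List Int) (cloud_locations : List Int) (cloud_ranges : List Int) : Prop :=
  town_locations.length ≤ town_populations.length ∧
  cloud_locations.length ≤ cloud_ranges.length ∧
  ∀ p ∈ cloud_locations.zip cloud_ranges, ∀ x ∈ town_locations,
    ¬ (p.1 + p.2 < x ∧ x < p.1 - p.2)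
instance (town_populations : List Int) (town_locations : List Int) (cloud_locations : List Int) (cloud_ranges : List Int) : Decidable (Pre_maximum_people_sunny_after_cloud_removal town_populations town_locations cloud_locations cloud_ranges) := by unfold Pre_maximum_people_sunny_after_cloud_removal; infer_instance

def pvWitness_maximum_people_sunny_after_cloud_removal : List Int × List Int × List Int × List Int :=
  ([5, 3], [1, 10], [2], [3])

def Spec_maximum_people_sunny_after_cloud_removal (town_populations : List Int) (town_locations : List Int) (cloud_locations : List Int) (cloud_ranges : List Int) (out : Int) : Prop := out = maximum_people_sunny_after_cloud_removal_alt town_populations town_locations cloud_locations cloud_ranges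
instance (town_populations : List Int) (town_locations : List Int) (cloud_locations : List Int) (cloud_ranges : List Int) (out : Int) : Decidable (Spec_maximum_people_sunny_after_cloud_removal town_populations town_locations cloud_locations cloud_ranges out) := by unfold Spec_maximum_people_sunny_after_cloud_removal; infer_instance

-- ===== CLAIM (what is proved, stated in full; the proofs are below) =====
def Claim_equal_maximum_people_sunny_after_cloud_removal : Prop := ∀ (town_populations : List Int) (town_locations : List Int) (cloud_locations : List Int) (cloud_ranges : List Int), Dom_maximum_people_sunny_after_cloud_removal town_populations town_locations cloud_locations cloud_ranges → Pre_maximum_people_sunny_after_cloud_removal town_populations town_locations cloud_locations cloud_ranges → Spec_maximum_people_sunny_after_cloud_removal town_populations town_locations cloud_locations cloud_ranges (maximum_people_sunny_after_cloud_removal town_populations town_locations cloud_locations cloud_ranges)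

-- ===== LEMMAS AND PROOFS =====

-- proof-only abbreviations: cloud j's interval start / end
def pvS (cloud_locations cloud_ranges : List Int) (j : Int) : Int :=
  PySem.List.pyGetD cloud_locations j 0 - PySem.List.pyGetD cloud_ranges j 0
def pvE (cloud_locations cloud_ranges : List Int) (j : Int) : Int :=
  PySem.List.pyGetD cloud_locations j 0 + PySem.List.pyGetD cloud_ranges j 0

-- A's per-town step expressed with B's covering-cloud list (A's branch order)
def pvStepA (C : List (Int × Int)) (st : PySem.Dict Int Int × Int) (t : Int × Int × Int) :
    PySem.Dict Int Int × Int :=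
  let cov := pvCover C t.1
  if (cov.length : Int) == 1 then (PySem.Dict.modify st.1 (cov.headD 0) 0 (· + t.2.1), st.2)
  else if (cov.length : Int) == 0 then (st.1, st.2 + t.2.1)
  else st

theorem pv_insertBy_pairwise {α : Type} (before : α → α → Bool) (R : α → α → Prop)
    (htrans : ∀ a b c, R a b → R b c → R a c)
    (h1 : ∀ a b, before a b = true → R a b) (h2 : ∀ a b, before a b = false → R b a)
    (x : α) (ys : List α) (hys : ys.Pairwise R) :
    (PySem.List.insertBy before x ys).Pairwise R := by
  induction ys with
  | nil => simp [PySem.List.insertBy]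
  | cons y ys ih =>
    rw [List.pairwise_cons] at hys
    rw [PySem.List.insertBy]
    by_cases hb : before x y = true
    · simp only [hb, if_true]
      refine List.Pairwise.cons ?_ (List.Pairwise.cons hys.1 hys.2)
      intro z hz
      rw [List.mem_cons] at hz
      rcases hz with rfl | hz
      · exact h1 _ _ hb
      · exact htrans _ _ _ (h1 _ _ hb) (hys.1 z hz)
    · simp only [Bool.not_eq_true] at hb
      simp only [hb]
      refine List.Pairwise.cons ?_ (ih hys.2)
      intro z hz
      rw [PySem.List.mem_insertBy] at hz
      rcases hz with rfl | hz
      · exact h2 _ _ hb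
      · exact hys.1 z hz

theorem pv_foldl_insertBy_pairwise {α : Type} (before : α → α → Bool) (R : α → α → Prop)
    (htrans : ∀ a b c, R a b → R b c → R a c)
    (h1 : ∀ a b, before a b = true → R a b) (h2 : ∀ a b, before a b = false → R b a)
    (xs acc : List α) (hacc : acc.Pairwise R) :
    (xs.foldl (fun acc x => PySem.List.insertBy before x acc) acc).Pairwise R := by
  induction xs generalizing acc with
  | nil => exact hacc
  | cons x xs ih => exact ih _ (pv_insertBy_pairwise before R htrans h1 h2 x acc hacc)

theorem pv_sorted2_pairwise_fst {α : Type} (xs : List α) (k1 : α → Int) (k2 : α → Int) :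
    (PySem.List.sorted2 xs k1 k2).Pairwise (fun a b => k1 a ≤ k1 b) := by
  have hdef : PySem.List.sorted2 xs k1 k2 = xs.foldl (fun acc x => PySem.List.insertBy
      (fun a b => decide (k1 a < k1 b) || (!decide (k1 b < k1 a) && decide (k2 a < k2 b))) x acc) [] := rfl
  rw [hdef]
  refine pv_foldl_insertBy_pairwise _ _ (fun a b c (hab : k1 a ≤ k1 b) hbc => le_trans hab hbc) ?_ ?_ xs [] (by simp)
  · intro a b h
    simp only [Bool.or_eq_true, Bool.and_eq_true, Bool.not_eq_true', decide_eq_false_iff_not,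
      decide_eq_true_eq] at h
    rcases h with h | ⟨h, _⟩ <;> omega
  · intro a b h
    simp only [Bool.or_eq_false_iff, Bool.and_eq_false_iff, Bool.not_eq_false', decide_eq_false_iff_not,
      decide_eq_true_eq] at h
    omega

theorem pvAdvStart_spec (x : Int) (S : List (Int × Int)) (cl : PySem.Set Int)
    (hS : S.Pairwise (fun a b => a.1 ≤ b.1)) (hnd : cl.Nodup) :
    (pvAdvStart x S cl).1 = S.filter (fun p => decide (x < p.1)) ∧
    (∀ j, j ∈ (pvAdvStart x S cl).2 ↔ j ∈ cl ∨ ∃ p ∈ S, p.1 ≤ x ∧ p.2 = j) ∧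
    (pvAdvStart x S cl).2.Nodup := by
  induction S generalizing cl with
  | nil => simp [pvAdvStart, hnd]
  | cons p rest ih =>
    rw [List.pairwise_cons] at hS
    by_cases hp : p.1 ≤ x
    · have := ih (PySem.Set.add cl p.2) hS.2 (PySem.Set.nodup_add cl p.2 hnd)
      rw [pvAdvStart, if_pos hp]
      refine ⟨?_, ?_, this.2.2⟩
      · rw [this.1, List.filter_cons_of_neg (by simp; omega)]
      · intro j
        rw [this.2.1 j, PySem.Set.mem_add]
        constructor
        · rintro ((h | rfl) | ⟨q, hq, h1, h2⟩)
          · exact Or.inl h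
          · exact Or.inr ⟨p, by simp, hp, rfl⟩
          · exact Or.inr ⟨q, by simp [hq], h1, h2⟩
        · rintro (h | ⟨q, hq, h1, h2⟩)
          · exact Or.inl (Or.inl h)
          · rw [List.mem_cons] at hq
            rcases hq with rfl | hq
            · exact Or.inl (Or.inr h2.symm)
            · exact Or.inr ⟨q, hq, h1, h2⟩
    · rw [pvAdvStart, if_neg hp]
      refine ⟨?_, ?_, hnd⟩
      · rw [List.filter_cons_of_pos (by simp; omega), List.filter_eq_self.mpr]
        intro q hq
        have := hS.1 q hq
        simp; omega
      · intro j
        simp only [List.mem_cons]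
        constructor
        · exact fun h => Or.inl h
        · rintro (h | ⟨q, hq, h1, h2⟩)
          · exact h
          · rcases hq with rfl | hq
            · omega
            · have := hS.1 q hq; omega

theorem pvAdvEnd_spec (x : Int) (E : List (Int × Int)) (cl : PySem.Set Int)
    (hE : E.Pairwise (fun a b => a.1 ≤ b.1)) (hnd : cl.Nodup) :
    (pvAdvEnd x E cl).1 = E.filter (fun p => decide (x ≤ p.1)) ∧
    (∀ j, j ∈ (pvAdvEnd x E cl).2 ↔ j ∈ cl ∧ ∀ p ∈ E, p.1 < x → p.2 ≠ j) ∧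
    (pvAdvEnd x E cl).2.Nodup := by
  induction E generalizing cl with
  | nil => simp [pvAdvEnd, hnd]
  | cons p rest ih =>
    rw [List.pairwise_cons] at hE
    by_cases hp : p.1 < x
    · have := ih (PySem.Set.discard cl p.2) hE.2 (PySem.Set.nodup_discard cl p.2 hnd)
      rw [pvAdvEnd, if_pos hp]
      refine ⟨?_, ?_, this.2.2⟩
      · rw [this.1, List.filter_cons_of_neg (by simp; omega)]
      · intro j
        rw [this.2.1 j]
        constructor
        · rintro ⟨hin, hrest⟩
          rw [PySem.Set.mem_discard] at hin
          refine ⟨hin.1, ?_⟩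
          intro q hq h1
          rw [List.mem_cons] at hq
          rcases hq with rfl | hq
          · exact hin.2.symm
          · exact hrest q hq h1
        · rintro ⟨hin, hall⟩
          refine ⟨?_, fun q hq h1 => hall q (by simp [hq]) h1⟩
          rw [PySem.Set.mem_discard]
          exact ⟨hin, (hall p (by simp) hp).symm⟩
    · rw [pvAdvEnd, if_neg hp]
      refine ⟨?_, ?_, hnd⟩
      · rw [List.filter_cons_of_pos (by simp; omega), List.filter_eq_self.mpr]
        intro q hq
        have := hE.1 q hq
        simp; omega
      · intro j
        constructor
        · intro h
          refine ⟨h, ?_⟩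
          intro q hq h1
          rw [List.mem_cons] at hq
          rcases hq with rfl | hq
          · omega
          · have := hE.1 q hq; omega
        · exact fun h => h.1

theorem pv_getD_eq (l : List Int) (k : Nat) (hk : k < l.length) :
    PySem.List.pyGetD l (k : Int) 0 = l[k] := by
  rw [PySem.List.pyGetD_natCast, List.getD_eq_getElem?_getD, List.getElem?_eq_getElem hk]
  rfl

theorem pvCover_mem (cloud_locations cloud_ranges : List Int)
    (hlen : cloud_locations.length ≤ cloud_ranges.length) (x j : Int) :
    j ∈ pvCover (cloud_locations.zip cloud_ranges) x ↔
      j ∈ PySem.List.pyRange 0 (cloud_locations.length : Int) 1 ∧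
      pvS cloud_locations cloud_ranges j ≤ x ∧ x ≤ pvE cloud_locations cloud_ranges j := by
  have hzlen : (cloud_locations.zip cloud_ranges).length = cloud_locations.length := by
    rw [List.length_zip]; omega
  unfold pvCover
  rw [List.mem_map]
  constructor
  · rintro ⟨p, hp, rfl⟩
    rw [List.mem_filter, PySem.List.mem_enumerate_iff] at hp
    obtain ⟨⟨k, hk, rfl⟩, hcond⟩ := hp
    rw [hzlen] at hk
    simp only [Bool.and_eq_true, decide_eq_true_eq] at hcond
    have hget := List.getElem_zip (l := cloud_locations) (l' := cloud_ranges)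
      (i := k) (h := by rw [hzlen]; exact hk)
    refine ⟨by rw [PySem.List.mem_pyRange_one]; omega, ?_, ?_⟩ <;>
      simp only [pvS, pvE, zero_add, pv_getD_eq cloud_locations k hk,
        pv_getD_eq cloud_ranges k (by omega)] <;>
      · rw [hget] at hcond; simp only [zero_add] at hcond; omega
  · rintro ⟨hj, h1, h2⟩
    rw [PySem.List.mem_pyRange_one] at hj
    obtain ⟨k, rfl⟩ : ∃ k : Nat, j = (k : Int) := ⟨j.toNat, by omega⟩
    have hk : k < cloud_locations.length := by exact_mod_cast hj.2
    refine ⟨((k : Int), (cloud_locations.zip cloud_ranges)[k]'(by rw [hzlen]; exact hk)), ?_, rfl⟩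
    rw [List.mem_filter, PySem.List.mem_enumerate_iff]
    have hget := List.getElem_zip (l := cloud_locations) (l' := cloud_ranges)
      (i := k) (h := by rw [hzlen]; exact hk)
    refine ⟨⟨k, by rw [hzlen]; exact hk, by simp⟩, ?_⟩
    simp only [Bool.and_eq_true, decide_eq_true_eq, hget]
    simp only [pvS, pvE, pv_getD_eq cloud_locations k hk,
      pv_getD_eq cloud_ranges k (by omega)] at h1 h2
    exact ⟨h1, h2⟩

theorem pvCover_nodup (C : List (Int × Int)) (x : Int) : (pvCover C x).Nodup := by
  unfold pvCover
  have h1 : (PySem.List.enumerate C 0).Pairwise (fun p q => p.1 < q.1) :=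
    PySem.List.pairwise_lt_enumerate C 0
  have h2 := (h1.filter (fun p => decide (p.2.1 - p.2.2 ≤ x) && decide (x ≤ p.2.1 + p.2.2)))
  have h3 : (((PySem.List.enumerate C 0).filter
      (fun p => decide (p.2.1 - p.2.2 ≤ x) && decide (x ≤ p.2.1 + p.2.2))).map (·.1)).Pairwise (· < ·) :=
    List.Pairwise.map _ (fun a b h => h) h2
  exact h3.imp (fun h => ne_of_lt h)

theorem pv_mem_startAll (n : Int) (f : Int → Int) (s j : Int) :
    (s, j) ∈ (PySem.List.pyRange 0 n 1).map (fun i => (f i, i)) ↔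
      j ∈ PySem.List.pyRange 0 n 1 ∧ s = f j := by
  rw [List.mem_map]
  constructor
  · rintro ⟨i, hi, heq⟩
    obtain ⟨rfl, rfl⟩ : f i = s ∧ i = j := by
      constructor <;> [exact congrArg Prod.fst heq; exact congrArg Prod.snd heq]
    exact ⟨hi, rfl⟩
  · rintro ⟨hj, rfl⟩
    exact ⟨j, hj, rfl⟩

theorem pvALoop_cons (t : Int × Int × Int) (ts : List (Int × Int × Int)) (S E : List (Int × Int))
    (cl : PySem.Set Int) (d : PySem.Dict Int Int) (free : Int) :
    pvALoop (t :: ts) S E cl d free =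
      if PySem.Set.len (pvAdvEnd t.1 E (pvAdvStart t.1 S cl).2).2 == 1 then
        pvALoop ts (pvAdvStart t.1 S cl).1 (pvAdvEnd t.1 E (pvAdvStart t.1 S cl).2).1
          (pvAdvEnd t.1 E (pvAdvStart t.1 S cl).2).2
          (PySem.Dict.modify d ((pvAdvEnd t.1 E (pvAdvStart t.1 S cl).2).2.headD 0) 0 (· + t.2.1)) free
      else if PySem.Set.len (pvAdvEnd t.1 E (pvAdvStart t.1 S cl).2).2 == 0 then
        pvALoop ts (pvAdvStart t.1 S cl).1 (pvAdvEnd t.1 E (pvAdvStart t.1 S cl).2).1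
          (pvAdvEnd t.1 E (pvAdvStart t.1 S cl).2).2 d (free + t.2.1)
      else
        pvALoop ts (pvAdvStart t.1 S cl).1 (pvAdvEnd t.1 E (pvAdvStart t.1 S cl).2).1
          (pvAdvEnd t.1 E (pvAdvStart t.1 S cl).2).2 d free := rfl

theorem pvStepA_def (C : List (Int × Int)) (st : PySem.Dict Int Int × Int) (t : Int × Int × Int) :
    pvStepA C st t =
      if ((pvCover C t.1).length : Int) == 1 then
        (PySem.Dict.modify st.1 ((pvCover C t.1).headD 0) 0 (· + t.2.1), st.2)
      else if ((pvCover C t.1).length : Int) == 0 then (st.1, st.2 + t.2.1)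
      else st := rfl

theorem pvALoop_eq (cloud_locations cloud_ranges : List Int)
    (hlen : cloud_locations.length ≤ cloud_ranges.length) (ts : List (Int × Int × Int)) :
    ∀ (x0 : Int) (cl : PySem.Set Int) (d : PySem.Dict Int Int) (free : Int),
    ts.Pairwise (fun a b => a.1 ≤ b.1) →
    (∀ t ∈ ts, x0 ≤ t.1) →
    (∀ t ∈ ts, ∀ j ∈ PySem.List.pyRange 0 (cloud_locations.length : Int) 1,
      ¬(pvE cloud_locations cloud_ranges j < t.1 ∧ t.1 < pvS cloud_locations cloud_ranges j)) →
    (∀ j ∈ PySem.List.pyRange 0 (cloud_locations.length : Int) 1,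
      ¬(pvE cloud_locations cloud_ranges j < x0 ∧ x0 < pvS cloud_locations cloud_ranges j)) →
    (∀ j, j ∈ cl ↔ j ∈ PySem.List.pyRange 0 (cloud_locations.length : Int) 1 ∧
      pvS cloud_locations cloud_ranges j ≤ x0 ∧ x0 ≤ pvE cloud_locations cloud_ranges j) →
    cl.Nodup →
    pvALoop ts
      ((PySem.List.sorted2 ((PySem.List.pyRange 0 (cloud_locations.length : Int) 1).map
          (fun i => (pvS cloud_locations cloud_ranges i, i))) (fun p => p.1) (fun p => p.2)).filter
        (fun p => decide (x0 < p.1)))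
      ((PySem.List.sorted2 ((PySem.List.pyRange 0 (cloud_locations.length : Int) 1).map
          (fun i => (pvE cloud_locations cloud_ranges i, i))) (fun p => p.1) (fun p => p.2)).filter
        (fun p => decide (x0 ≤ p.1)))
      cl d free
    = ts.foldl (pvStepA (cloud_locations.zip cloud_ranges)) (d, free) := by
  set rng := PySem.List.pyRange 0 (cloud_locations.length : Int) 1 with hrng
  set SA := PySem.List.sorted2 (rng.map (fun i => (pvS cloud_locations cloud_ranges i, i)))
      (fun p => p.1) (fun p => p.2) with hSA
  set EA := PySem.List.sorted2 (rng.map (fun i => (pvE cloud_locations cloud_ranges i, i)))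
      (fun p => p.1) (fun p => p.2) with hEA
  induction ts with
  | nil => intro x0 cl d free _ _ _ _ _ _; rfl
  | cons t ts ih =>
    intro x0 cl d free hpw hbound hpre hx0pre hcl hnd
    rw [List.pairwise_cons] at hpw
    have hx0x : x0 ≤ t.1 := hbound t (by simp)
    have hSAp : SA.Pairwise (fun a b => a.1 ≤ b.1) := pv_sorted2_pairwise_fst _ _ _
    have hEAp : EA.Pairwise (fun a b => a.1 ≤ b.1) := pv_sorted2_pairwise_fst _ _ _
    have hSmem : ∀ p, p ∈ SA ↔ p ∈ rng.map (fun i => (pvS cloud_locations cloud_ranges i, i)) :=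
      fun p => (PySem.List.sorted2_perm _ _ _ _).mem_iff
    have hEmem : ∀ p, p ∈ EA ↔ p ∈ rng.map (fun i => (pvE cloud_locations cloud_ranges i, i)) :=
      fun p => (PySem.List.sorted2_perm _ _ _ _).mem_iff
    obtain ⟨hS1, hS2, hS3⟩ := pvAdvStart_spec t.1 (SA.filter (fun p => decide (x0 < p.1))) cl
      (hSAp.filter _) hnd
    set cl1 := (pvAdvStart t.1 (SA.filter (fun p => decide (x0 < p.1))) cl).2 with hcl1
    obtain ⟨hE1, hE2, hE3⟩ := pvAdvEnd_spec t.1 (EA.filter (fun p => decide (x0 ≤ p.1))) cl1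
      (hEAp.filter _) hS3
    -- the advanced suffixes are the filters at the new frontier t.1
    have hS1' : (pvAdvStart t.1 (SA.filter (fun p => decide (x0 < p.1))) cl).1
        = SA.filter (fun p => decide (t.1 < p.1)) := by
      rw [hS1, List.filter_filter]
      refine List.filter_congr ?_
      intro p _
      by_cases h : t.1 < p.1 <;> simp [h] <;> omega
    have hE1' : (pvAdvEnd t.1 (EA.filter (fun p => decide (x0 ≤ p.1))) cl1).1
        = EA.filter (fun p => decide (t.1 ≤ p.1)) := by
      rw [hE1, List.filter_filter]
      refine List.filter_congr ?_
      intro p _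
      by_cases h : t.1 ≤ p.1 <;> simp [h] <;> omega
    -- membership of the set after both advances
    have hm2 : ∀ j, j ∈ (pvAdvEnd t.1 (EA.filter (fun p => decide (x0 ≤ p.1))) cl1).2 ↔
        j ∈ rng ∧ pvS cloud_locations cloud_ranges j ≤ t.1 ∧
          t.1 ≤ pvE cloud_locations cloud_ranges j := by
      intro j
      rw [hE2 j]
      have hmem1 : j ∈ cl1 ↔ (j ∈ cl ∨ ∃ p ∈ SA.filter (fun p => decide (x0 < p.1)),
          p.1 ≤ t.1 ∧ p.2 = j) := hS2 j
      have hSfilt : (∃ p ∈ SA.filter (fun p => decide (x0 < p.1)), p.1 ≤ t.1 ∧ p.2 = j) ↔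
          (j ∈ rng ∧ x0 < pvS cloud_locations cloud_ranges j ∧
            pvS cloud_locations cloud_ranges j ≤ t.1) := by
        constructor
        · rintro ⟨p, hp, h1, rfl⟩
          rw [List.mem_filter, hSmem, pv_mem_startAll] at hp
          obtain ⟨⟨hj, hs⟩, hx0⟩ := hp
          simp only [decide_eq_true_eq] at hx0
          rw [hs] at hx0 h1
          exact ⟨hj, hx0, h1⟩
        · rintro ⟨hj, h1, h2⟩
          refine ⟨(pvS cloud_locations cloud_ranges j, j), ?_, h2, rfl⟩
          rw [List.mem_filter, hSmem, pv_mem_startAll]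
          simp only [decide_eq_true_eq]
          exact ⟨⟨hj, trivial⟩, h1⟩
      have hEfilt : (∀ p ∈ EA.filter (fun p => decide (x0 ≤ p.1)), p.1 < t.1 → p.2 ≠ j) ↔
          ¬ (j ∈ rng ∧ x0 ≤ pvE cloud_locations cloud_ranges j ∧
            pvE cloud_locations cloud_ranges j < t.1) := by
        constructor
        · rintro hall ⟨hj, h1, h2⟩
          exact hall (pvE cloud_locations cloud_ranges j, j)
            (by rw [List.mem_filter, hEmem, pv_mem_startAll]
                simp only [decide_eq_true_eq]
                exact ⟨⟨hj, trivial⟩, h1⟩) h2 rfl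
        · rintro hno p hp h1 rfl
          rw [List.mem_filter, hEmem, pv_mem_startAll] at hp
          obtain ⟨⟨hj, hs⟩, hx0⟩ := hp
          simp only [decide_eq_true_eq] at hx0
          rw [hs] at hx0 h1
          exact hno ⟨hj, hx0, h1⟩
      rw [hmem1, hSfilt, hEfilt, hcl j]
      by_cases hj : j ∈ rng
      · simp only [hj, true_and]
        have h1 := hx0pre j hj
        have h2 := hpre t (by simp) j hj
        constructor
        · rintro ⟨hin, hnot⟩; omega
        · rintro ⟨h3, h4⟩
          constructor
          · omega
          · omega
      · simp [hj]
    set cl2 := (pvAdvEnd t.1 (EA.filter (fun p => decide (x0 ≤ p.1))) cl1).2 with hcl2v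
    have hperm : cl2.Perm (pvCover (cloud_locations.zip cloud_ranges) t.1) := by
      rw [List.perm_ext_iff_of_nodup hE3 (pvCover_nodup _ _)]
      intro a
      rw [hm2 a, pvCover_mem cloud_locations cloud_ranges hlen t.1 a]
    have hlen2 : cl2.length = (pvCover (cloud_locations.zip cloud_ranges) t.1).length :=
      hperm.length_eq
    have hih : ∀ d' free', pvALoop ts (SA.filter (fun p => decide (t.1 < p.1)))
        (EA.filter (fun p => decide (t.1 ≤ p.1))) cl2 d' free'
        = ts.foldl (pvStepA (cloud_locations.zip cloud_ranges)) (d', free') :=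
      fun d' free' => ih t.1 cl2 d' free' hpw.2 hpw.1 (fun t' ht' => hpre t' (by simp [ht']))
        (fun j hj => hpre t (by simp) j hj) hm2 hE3
    rw [pvALoop_cons, List.foldl_cons, pvStepA_def]
    rw [hS1', hE1', ← hcl1, ← hcl2v]
    by_cases h1 : (pvCover (cloud_locations.zip cloud_ranges) t.1).length = 1
    · obtain ⟨c, hc⟩ := List.length_eq_one_iff.mp h1
      have hcl2eq : cl2 = [c] := by
        rw [← List.perm_singleton, ← hc]
        exact hperm
      have hcond : (PySem.Set.len cl2 == 1) = true := by rw [hcl2eq]; rfl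
      have hcond' : (((pvCover (cloud_locations.zip cloud_ranges) t.1).length : Int) == 1) = true := by
        rw [h1]; rfl
      rw [hcond, hcond', if_pos rfl, if_pos rfl]
      have hkey : cl2.headD 0 = (pvCover (cloud_locations.zip cloud_ranges) t.1).headD 0 := by
        rw [hcl2eq, hc]
      rw [hkey]
      exact hih _ _
    · by_cases h0 : (pvCover (cloud_locations.zip cloud_ranges) t.1).length = 0
      · have hcl2eq : cl2 = [] := List.length_eq_zero_iff.mp (by rw [hlen2, h0])
        have hcond : (PySem.Set.len cl2 == 1) = false := by rw [hcl2eq]; rfl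
        have hcond0 : (PySem.Set.len cl2 == 0) = true := by rw [hcl2eq]; rfl
        have hcond' : (((pvCover (cloud_locations.zip cloud_ranges) t.1).length : Int) == 1) = false := by
          rw [h0]; rfl
        have hcond0' : (((pvCover (cloud_locations.zip cloud_ranges) t.1).length : Int) == 0) = true := by
          rw [h0]; rfl
        rw [hcond, hcond', hcond0, hcond0']
        simp only [Bool.false_eq_true, if_false, if_pos rfl]
        exact hih _ _
      · have hcond : (PySem.Set.len cl2 == 1) = false := by
          simp only [PySem.Set.len, beq_eq_false_iff_ne, ne_eq]
          rw [hlen2]; omega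
        have hcond0 : (PySem.Set.len cl2 == 0) = false := by
          simp only [PySem.Set.len, beq_eq_false_iff_ne, ne_eq]
          rw [hlen2]; omega
        have hcond' : (((pvCover (cloud_locations.zip cloud_ranges) t.1).length : Int) == 1) = false := by
          simp only [beq_eq_false_iff_ne, ne_eq]; omega
        have hcond0' : (((pvCover (cloud_locations.zip cloud_ranges) t.1).length : Int) == 0) = false := by
          simp only [beq_eq_false_iff_ne, ne_eq]; omega
        rw [hcond, hcond', hcond0, hcond0']
        simp only [Bool.false_eq_true, if_false]
        exact hih _ _

theorem pvBStep_def (C : List (Int × Int)) (st : Int × PySem.Dict Int Int) (t : Int × Int) :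
    pvBStep C st t =
      if (pvCover C t.1).isEmpty then (st.1 + t.2, st.2)
      else if ((pvCover C t.1).length : Int) == 1 then
        (st.1, PySem.Dict.modify st.2 ((pvCover C t.1).headD 0) 0 (· + t.2))
      else st := rfl

-- characterizations of the two folds: free total, per-key total, key membership, key nodup
theorem pvStepA_foldl_char (C : List (Int × Int)) (L : List (Int × Int × Int)) :
    ∀ st : PySem.Dict Int Int × Int,
    (L.foldl (pvStepA C) st).2 = st.2 +
      ((L.filter (fun t => decide ((pvCover C t.1).length = 0))).map (fun t => t.2.1)).sum ∧
    (∀ k : Int, (L.foldl (pvStepA C) st).1.getD k 0 = st.1.getD k 0 +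
      ((L.filter (fun t => decide ((pvCover C t.1).length = 1 ∧ (pvCover C t.1).headD 0 = k))).map
        (fun t => t.2.1)).sum) ∧
    (∀ k : Int, k ∈ (L.foldl (pvStepA C) st).1.keys ↔ k ∈ st.1.keys ∨
      ∃ t ∈ L, (pvCover C t.1).length = 1 ∧ (pvCover C t.1).headD 0 = k) ∧
    (st.1.keys.Nodup → (L.foldl (pvStepA C) st).1.keys.Nodup) := by
  induction L with
  | nil => intro st; simp
  | cons t L ih =>
    intro st
    rw [List.foldl_cons, pvStepA_def]
    by_cases h1 : (pvCover C t.1).length = 1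
    · have hc1 : (((pvCover C t.1).length : Int) == 1) = true := by rw [h1]; rfl
      rw [hc1, if_pos rfl]
      obtain ⟨ihf, ihg, ihk, ihn⟩ := ih (PySem.Dict.modify st.1 ((pvCover C t.1).headD 0) 0 (· + t.2.1), st.2)
      refine ⟨?_, ?_, ?_, ?_⟩
      · rw [ihf, List.filter_cons_of_neg (by simp only [decide_eq_true_eq]; omega)]
      · intro k
        rw [ihg k]
        by_cases hk : (pvCover C t.1).headD 0 = k
        · rw [List.filter_cons_of_pos (by simp only [decide_eq_true_eq]; exact ⟨h1, hk⟩)]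
          simp only [List.map_cons, List.sum_cons]
          rw [PySem.Dict.getD_modify _ _ _ _ _]
          rw [if_pos hk.symm]
          beta_reduce
          try subst hk
          ring
        · rw [List.filter_cons_of_neg (by simp only [decide_eq_true_eq, not_and]; exact fun _ => hk)]
          rw [PySem.Dict.getD_modify _ _ _ _ _, if_neg (fun h => hk h.symm)]
      · intro k
        rw [ihk k]
        simp only [PySem.Dict.modify, PySem.Dict.mem_keys_insert, List.mem_cons]
        constructor
        · rintro (( rfl | hk) | ⟨q, hq, hcond⟩)
          · exact Or.inr ⟨t, Or.inl rfl, h1, rfl⟩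
          · exact Or.inl hk
          · exact Or.inr ⟨q, Or.inr hq, hcond⟩
        · rintro (hk | ⟨q, (rfl | hq), hcond⟩)
          · exact Or.inl (Or.inr hk)
          · exact Or.inl (Or.inl hcond.2.symm)
          · exact Or.inr ⟨q, hq, hcond⟩
      · intro hnd
        exact ihn (by
          rw [PySem.Dict.modify]
          exact PySem.Dict.nodup_keys_insert _ _ _ hnd)
    · by_cases h0 : (pvCover C t.1).length = 0
      · have hc1 : (((pvCover C t.1).length : Int) == 1) = false := by rw [h0]; rfl
        have hc0 : (((pvCover C t.1).length : Int) == 0) = true := by rw [h0]; rfl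
        rw [hc1, hc0, if_neg (by simp), if_pos rfl]
        obtain ⟨ihf, ihg, ihk, ihn⟩ := ih (st.1, st.2 + t.2.1)
        refine ⟨?_, ?_, ?_, ?_⟩
        · rw [ihf, List.filter_cons_of_pos (by simp only [decide_eq_true_eq]; omega)]
          simp only [List.map_cons, List.sum_cons]
          beta_reduce
          try subst hk
          ring
        · intro k
          rw [ihg k, List.filter_cons_of_neg (by simp only [decide_eq_true_eq]; omega)]
        · intro k
          rw [ihk k]
          simp only [List.mem_cons]
          constructor
          · rintro (hk | ⟨q, hq, hcond⟩)
            · exact Or.inl hk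
            · exact Or.inr ⟨q, Or.inr hq, hcond⟩
          · rintro (hk | ⟨q, (rfl | hq), hcond⟩)
            · exact Or.inl hk
            · omega
            · exact Or.inr ⟨q, hq, hcond⟩
        · exact fun h => ihn h
      · have hc1 : (((pvCover C t.1).length : Int) == 1) = false := by
          simp only [beq_eq_false_iff_ne, ne_eq]; omega
        have hc0 : (((pvCover C t.1).length : Int) == 0) = false := by
          simp only [beq_eq_false_iff_ne, ne_eq]; omega
        rw [hc1, hc0, if_neg (by simp), if_neg (by simp)]
        obtain ⟨ihf, ihg, ihk, ihn⟩ := ih st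
        refine ⟨?_, ?_, ?_, ?_⟩
        · rw [ihf, List.filter_cons_of_neg (by simp only [decide_eq_true_eq]; omega)]
        · intro k
          rw [ihg k, List.filter_cons_of_neg (by simp only [decide_eq_true_eq]; omega)]
        · intro k
          rw [ihk k]
          simp only [List.mem_cons]
          constructor
          · rintro (hk | ⟨q, hq, hcond⟩)
            · exact Or.inl hk
            · exact Or.inr ⟨q, Or.inr hq, hcond⟩
          · rintro (hk | ⟨q, (rfl | hq), hcond⟩)
            · exact Or.inl hk
            · omega
            · exact Or.inr ⟨q, hq, hcond⟩
        · exact fun h => ihn h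

theorem pvBStep_foldl_char (C : List (Int × Int)) (L : List (Int × Int)) :
    ∀ st : Int × PySem.Dict Int Int,
    (L.foldl (pvBStep C) st).1 = st.1 +
      ((L.filter (fun t => decide ((pvCover C t.1).length = 0))).map (fun t => t.2)).sum ∧
    (∀ k : Int, (L.foldl (pvBStep C) st).2.getD k 0 = st.2.getD k 0 +
      ((L.filter (fun t => decide ((pvCover C t.1).length = 1 ∧ (pvCover C t.1).headD 0 = k))).map
        (fun t => t.2)).sum) ∧
    (∀ k : Int, k ∈ (L.foldl (pvBStep C) st).2.keys ↔ k ∈ st.2.keys ∨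
      ∃ t ∈ L, (pvCover C t.1).length = 1 ∧ (pvCover C t.1).headD 0 = k) ∧
    (st.2.keys.Nodup → (L.foldl (pvBStep C) st).2.keys.Nodup) := by
  induction L with
  | nil => intro st; simp
  | cons t L ih =>
    intro st
    rw [List.foldl_cons, pvBStep_def]
    by_cases h0 : (pvCover C t.1).length = 0
    · have he : (pvCover C t.1).isEmpty = true := by
        rw [List.isEmpty_iff, ← List.length_eq_zero_iff, h0]
      rw [he, if_pos rfl]
      obtain ⟨ihf, ihg, ihk, ihn⟩ := ih (st.1 + t.2, st.2)
      refine ⟨?_, ?_, ?_, ?_⟩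
      · rw [ihf, List.filter_cons_of_pos (by simp only [decide_eq_true_eq]; omega)]
        simp only [List.map_cons, List.sum_cons]
        ring
      · intro k
        rw [ihg k, List.filter_cons_of_neg (by simp only [decide_eq_true_eq]; omega)]
      · intro k
        rw [ihk k]
        simp only [List.mem_cons]
        constructor
        · rintro (hk | ⟨q, hq, hcond⟩)
          · exact Or.inl hk
          · exact Or.inr ⟨q, Or.inr hq, hcond⟩
        · rintro (hk | ⟨q, (rfl | hq), hcond⟩)
          · exact Or.inl hk
          · omega
          · exact Or.inr ⟨q, hq, hcond⟩
      · exact fun h => ihn h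
    · have he : (pvCover C t.1).isEmpty = false := by
        rw [← Bool.not_eq_true, List.isEmpty_iff, ← List.length_eq_zero_iff]
        omega
      rw [he, if_neg (by simp)]
      by_cases h1 : (pvCover C t.1).length = 1
      · have hc1 : (((pvCover C t.1).length : Int) == 1) = true := by rw [h1]; rfl
        rw [hc1, if_pos rfl]
        obtain ⟨ihf, ihg, ihk, ihn⟩ := ih (st.1, PySem.Dict.modify st.2 ((pvCover C t.1).headD 0) 0 (· + t.2))
        refine ⟨?_, ?_, ?_, ?_⟩
        · rw [ihf, List.filter_cons_of_neg (by simp only [decide_eq_true_eq]; omega)]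
        · intro k
          rw [ihg k]
          by_cases hk : (pvCover C t.1).headD 0 = k
          · rw [List.filter_cons_of_pos (by simp only [decide_eq_true_eq]; exact ⟨h1, hk⟩)]
            simp only [List.map_cons, List.sum_cons]
            rw [PySem.Dict.getD_modify _ _ _ _ _, if_pos hk.symm]
            beta_reduce
            try subst hk
            ring
          · rw [List.filter_cons_of_neg (by simp only [decide_eq_true_eq, not_and]; exact fun _ => hk)]
            rw [PySem.Dict.getD_modify _ _ _ _ _, if_neg (fun h => hk h.symm)]
        · intro k
          rw [ihk k]
          simp only [PySem.Dict.modify, PySem.Dict.mem_keys_insert, List.mem_cons]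
          constructor
          · rintro ((rfl | hk) | ⟨q, hq, hcond⟩)
            · exact Or.inr ⟨t, Or.inl rfl, h1, rfl⟩
            · exact Or.inl hk
            · exact Or.inr ⟨q, Or.inr hq, hcond⟩
          · rintro (hk | ⟨q, (rfl | hq), hcond⟩)
            · exact Or.inl (Or.inr hk)
            · exact Or.inl (Or.inl hcond.2.symm)
            · exact Or.inr ⟨q, hq, hcond⟩
        · intro hnd
          exact ihn (by
            rw [PySem.Dict.modify]
            exact PySem.Dict.nodup_keys_insert _ _ _ hnd)
      · have hc1 : (((pvCover C t.1).length : Int) == 1) = false := by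
          simp only [beq_eq_false_iff_ne, ne_eq]; omega
        rw [hc1, if_neg (by simp)]
        obtain ⟨ihf, ihg, ihk, ihn⟩ := ih st
        refine ⟨?_, ?_, ?_, ?_⟩
        · rw [ihf, List.filter_cons_of_neg (by simp only [decide_eq_true_eq]; omega)]
        · intro k
          rw [ihg k, List.filter_cons_of_neg (by simp only [decide_eq_true_eq]; omega)]
        · intro k
          rw [ihk k]
          simp only [List.mem_cons]
          constructor
          · rintro (hk | ⟨q, hq, hcond⟩)
            · exact Or.inl hk
            · exact Or.inr ⟨q, Or.inr hq, hcond⟩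
          · rintro (hk | ⟨q, (rfl | hq), hcond⟩)
            · exact Or.inl hk
            · omega
            · exact Or.inr ⟨q, hq, hcond⟩
        · exact fun h => ihn h

theorem pv_maxD_perm (l1 l2 : List Int) (h : l1.Perm l2) :
    PySem.List.maxD l1 (fun v => v) 0 = PySem.List.maxD l2 (fun v => v) 0 := by
  rcases hl1 : l1 with _ | ⟨a, l⟩
  · subst hl1
    rw [← h.nil_eq]
  · have h1 : l1 ≠ [] := by rw [hl1]; simp
    have h2 : l2 ≠ [] := by
      intro he
      rw [he] at h
      have := h.length_eq
      rw [hl1] at this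
      simp at this
    rw [← hl1]
    have m1def := PySem.List.max?_eq_some_maxD l1 (fun v => v) 0 h1
    have m2def := PySem.List.max?_eq_some_maxD l2 (fun v => v) 0 h2
    have hm1mem := PySem.List.max?_mem m1def
    have hm2mem := PySem.List.max?_mem m2def
    have hmax1 := PySem.List.max?_isMax m1def
    have hmax2 := PySem.List.max?_isMax m2def
    exact le_antisymm (hmax2 _ (h.subset hm1mem)) (hmax1 _ (h.symm.subset hm2mem))

theorem pv_foldr_min_le (l : List Int) (a y : Int) (hy : y ∈ l) : l.foldr min a ≤ y := by
  induction l with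
  | nil => cases hy
  | cons b l ih =>
    rw [List.mem_cons] at hy
    rcases hy with rfl | hy
    · exact min_le_left _ _
    · exact le_trans (min_le_right _ _) (ih hy)

theorem pv_towns_eq (town_populations town_locations : List Int)
    (hlen : town_locations.length ≤ town_populations.length) :
    (PySem.List.pyRange 0 (town_locations.length : Int) 1).map
      (fun i => (PySem.List.pyGetD town_locations i 0, PySem.List.pyGetD town_populations i 0, (-1 : Int)))
    = (town_locations.zip town_populations).map (fun q => (q.1, q.2, (-1 : Int))) := by
  rw [PySem.List.pyRange_zero_nat, List.map_map]
  apply List.ext_getElem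
  · simp [List.length_zip]; omega
  · intro i h1 h2
    simp only [List.getElem_map, List.getElem_range, Function.comp_apply]
    have hi : i < town_locations.length := by simpa using h1
    rw [pv_getD_eq town_locations i hi, pv_getD_eq town_populations i (by omega),
      List.getElem_zip]

theorem pv_main (town_populations town_locations cloud_locations cloud_ranges : List Int)
    (hl1 : town_locations.length ≤ town_populations.length)
    (hl2 : cloud_locations.length ≤ cloud_ranges.length)
    (hgap : ∀ p ∈ cloud_locations.zip cloud_ranges, ∀ x ∈ town_locations,
      ¬ (p.1 + p.2 < x ∧ x < p.1 - p.2)) :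
    maximum_people_sunny_after_cloud_removal town_populations town_locations cloud_locations cloud_ranges
    = maximum_people_sunny_after_cloud_removal_alt town_populations town_locations cloud_locations cloud_ranges := by
  have hgap' : ∀ j ∈ PySem.List.pyRange 0 (cloud_locations.length : Int) 1, ∀ x ∈ town_locations,
      ¬(pvE cloud_locations cloud_ranges j < x ∧ x < pvS cloud_locations cloud_ranges j) := by
    intro j hj x hx hcon
    rw [PySem.List.mem_pyRange_one] at hj
    obtain ⟨k, rfl⟩ : ∃ k : Nat, j = (k : Int) := ⟨j.toNat, by omega⟩
    have hk : k < cloud_locations.length := by exact_mod_cast hj.2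
    have hmem : (cloud_locations[k]'hk, cloud_ranges[k]'(by omega)) ∈
        cloud_locations.zip cloud_ranges := by
      have hz := List.getElem_zip (l := cloud_locations) (l' := cloud_ranges) (i := k)
        (h := by rw [List.length_zip]; omega)
      rw [← hz]
      exact List.getElem_mem _
    simp only [pvS, pvE, pv_getD_eq cloud_locations k hk, pv_getD_eq cloud_ranges k (by omega)] at hcon
    exact hgap _ hmem x hx ⟨hcon.1, hcon.2⟩
  simp only [maximum_people_sunny_after_cloud_removal, maximum_people_sunny_after_cloud_removal_alt]
  rw [pv_towns_eq town_populations town_locations hl1]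
  rw [show (fun i => (PySem.List.pyGetD cloud_locations i 0 - PySem.List.pyGetD cloud_ranges i 0, i))
      = (fun i => (pvS cloud_locations cloud_ranges i, i)) from rfl,
    show (fun i => (PySem.List.pyGetD cloud_locations i 0 + PySem.List.pyGetD cloud_ranges i 0, i))
      = (fun i => (pvE cloud_locations cloud_ranges i, i)) from rfl]
  set C := cloud_locations.zip cloud_ranges with hC
  set T := town_locations.zip town_populations with hT
  set towns' := PySem.List.sorted2 (T.map (fun q => (q.1, q.2, (-1 : Int))))
    (fun t => t.1) (fun t => t.2.1) with htowns'
  set rng := PySem.List.pyRange 0 (cloud_locations.length : Int) 1 with hrng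
  set SA := PySem.List.sorted2 (rng.map (fun i => (pvS cloud_locations cloud_ranges i, i)))
    (fun p => p.1) (fun p => p.2) with hSA
  set EA := PySem.List.sorted2 (rng.map (fun i => (pvE cloud_locations cloud_ranges i, i)))
    (fun p => p.1) (fun p => p.2) with hEA
  set x0 := ((town_locations ++ rng.map (pvS cloud_locations cloud_ranges)
    ++ rng.map (pvE cloud_locations cloud_ranges)).foldr min 0) - 1 with hx0
  have hmin : ∀ y ∈ (town_locations ++ rng.map (pvS cloud_locations cloud_ranges)
      ++ rng.map (pvE cloud_locations cloud_ranges)), x0 < y := by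
    intro y hy
    have := pv_foldr_min_le _ 0 y hy
    omega
  have hmemL : ∀ x ∈ town_locations, x ∈ (town_locations ++ rng.map (pvS cloud_locations cloud_ranges)
      ++ rng.map (pvE cloud_locations cloud_ranges)) :=
    fun x hx => List.mem_append.mpr (Or.inl (List.mem_append.mpr (Or.inl hx)))
  have hmemS : ∀ i ∈ rng, pvS cloud_locations cloud_ranges i ∈ (town_locations
      ++ rng.map (pvS cloud_locations cloud_ranges) ++ rng.map (pvE cloud_locations cloud_ranges)) :=
    fun i hi => List.mem_append.mpr (Or.inl (List.mem_append.mpr (Or.inr (List.mem_map.mpr ⟨i, hi, rfl⟩))))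
  have hmemE : ∀ i ∈ rng, pvE cloud_locations cloud_ranges i ∈ (town_locations
      ++ rng.map (pvS cloud_locations cloud_ranges) ++ rng.map (pvE cloud_locations cloud_ranges)) :=
    fun i hi => List.mem_append.mpr (Or.inr (List.mem_map.mpr ⟨i, hi, rfl⟩))
  have htfst : ∀ t ∈ towns', t.1 ∈ town_locations := by
    intro t ht
    rw [htowns'] at ht
    rw [(PySem.List.sorted2_perm _ _ _ _).mem_iff, List.mem_map] at ht
    obtain ⟨q, hq, rfl⟩ := ht
    exact (List.of_mem_zip hq).1
  have hbound : ∀ t ∈ towns', x0 ≤ t.1 := by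
    intro t ht
    have := hmin t.1 (hmemL t.1 (htfst t ht))
    omega
  have hSfull : SA.filter (fun p => decide (x0 < p.1)) = SA := by
    rw [List.filter_eq_self]
    intro p hp
    rw [hSA, (PySem.List.sorted2_perm _ _ _ _).mem_iff, List.mem_map] at hp
    obtain ⟨i, hi, rfl⟩ := hp
    simp only [decide_eq_true_eq]
    exact hmin _ (hmemS i hi)
  have hEfull : EA.filter (fun p => decide (x0 ≤ p.1)) = EA := by
    rw [List.filter_eq_self]
    intro p hp
    rw [hEA, (PySem.List.sorted2_perm _ _ _ _).mem_iff, List.mem_map] at hp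
    obtain ⟨i, hi, rfl⟩ := hp
    simp only [decide_eq_true_eq]
    have := hmin _ (hmemE i hi)
    omega
  have hloop := pvALoop_eq cloud_locations cloud_ranges hl2 towns' x0 PySem.Set.empty
    PySem.Dict.empty 0
    (pv_sorted2_pairwise_fst _ _ _)
    hbound
    (fun t ht j hj => hgap' j hj t.1 (htfst t ht))
    (fun j hj => by
      have := hmin _ (hmemE j hj)
      omega)
    (fun j => by
      constructor
      · intro h; cases h
      · rintro ⟨hj, h1, h2⟩
        have := hmin _ (hmemS j hj)
        omega)
    (by simp [PySem.Set.empty])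
  rw [hSfull, hEfull] at hloop
  rw [hloop]
  set Af := towns'.foldl (pvStepA C) (PySem.Dict.empty, 0) with hAf
  set Bf := T.foldl (pvBStep C) (0, PySem.Dict.empty) with hBf
  obtain ⟨haf, hag, hak, han⟩ := pvStepA_foldl_char C towns' (PySem.Dict.empty, 0)
  obtain ⟨hbf, hbg, hbk, hbn⟩ := pvBStep_foldl_char C T (0, PySem.Dict.empty)
  have hperm : towns'.Perm (T.map (fun q => (q.1, q.2, (-1 : Int)))) :=
    PySem.List.sorted2_perm _ _ _ _
  have hsum : ∀ (p : (Int × Int × Int) → Bool) (q : (Int × Int) → Bool),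
      (∀ t : Int × Int, p (t.1, t.2, (-1 : Int)) = q t) →
      ((towns'.filter p).map (fun t => t.2.1)).sum = ((T.filter q).map (fun t => t.2)).sum := by
    intro p q hpq
    have h1 : ((towns'.filter p).map (fun t => t.2.1)).Perm
        (((T.map (fun q' => (q'.1, q'.2, (-1 : Int)))).filter p).map (fun t => t.2.1)) :=
      (hperm.filter p).map _
    rw [h1.sum_eq, List.filter_map, List.map_map]
    have h2 : T.filter (p ∘ fun q' => (q'.1, q'.2, (-1 : Int))) = T.filter q :=
      List.filter_congr (fun t _ => hpq t)
    rw [h2]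
    rfl
  have hfree : Af.2 = Bf.1 := by
    rw [haf, hbf]
    rw [hsum (fun t => decide ((pvCover C t.1).length = 0))
      (fun t => decide ((pvCover C t.1).length = 0)) (fun t => rfl)]
  have hgetD : ∀ k, Af.1.getD k 0 = Bf.2.getD k 0 := by
    intro k
    rw [hag k, hbg k]
    rw [hsum (fun t => decide ((pvCover C t.1).length = 1 ∧ (pvCover C t.1).headD 0 = k))
      (fun t => decide ((pvCover C t.1).length = 1 ∧ (pvCover C t.1).headD 0 = k)) (fun t => rfl)]
  have hkeys : ∀ k, k ∈ Af.1.keys ↔ k ∈ Bf.2.keys := by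
    intro k
    rw [hak k, hbk k]
    simp only [PySem.Dict.keys_empty, List.not_mem_nil, false_or]
    constructor
    · rintro ⟨t, ht, hc⟩
      have hmem := hperm.subset ht
      rw [List.mem_map] at hmem
      obtain ⟨q, hq, rfl⟩ := hmem
      exact ⟨q, hq, hc⟩
    · rintro ⟨q, hq, hc⟩
      exact ⟨(q.1, q.2, (-1 : Int)), hperm.symm.subset (List.mem_map.mpr ⟨q, hq, rfl⟩), hc⟩
  have hndA : Af.1.keys.Nodup := han PySem.Dict.nodup_keys_empty
  have hndB : Bf.2.keys.Nodup := hbn PySem.Dict.nodup_keys_empty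
  have hkp : Af.1.keys.Perm Bf.2.keys := (List.perm_ext_iff_of_nodup hndA hndB).mpr hkeys
  have hvals : Af.1.values.Perm Bf.2.values := by
    rw [PySem.Dict.values_eq_map_keys Af.1 hndA 0, PySem.Dict.values_eq_map_keys Bf.2 hndB 0]
    rw [List.map_congr_left (fun k _ => hgetD k)]
    exact hkp.map _
  rw [pv_maxD_perm _ _ hvals, hfree]
  exact Int.add_comm _ _

-- ===== VERDICT (by name: the statement is the Claim_ definition above) =====
theorem maximum_people_sunny_after_cloud_removal_spec : Claim_equal_maximum_people_sunny_after_cloud_removal := by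
  intro town_populations town_locations cloud_locations cloud_ranges _ hpre
  unfold Spec_maximum_people_sunny_after_cloud_removal
  exact pv_main town_populations town_locations cloud_locations cloud_ranges
    hpre.1 hpre.2.1 hpre.2.2
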